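-- pv_equiv track=rewrite | github.com/sharmaji27/InterviewBit-Problems | Dynamic Programming/Kingdom War.py | solve
-- ===== SOURCE A (Python) =====
-- def solve(A):
--     rows = len(A)
--     cols = len(A[0])
--
--     dp = [[0 for _ in range(cols)]for _ in range(rows)]
--     dp[rows-1][cols-1] = A[rows-1][cols-1]
--
--     m = max(A[0][0],A[-1][-1])
--
--     for i in range(rows-2,-1,-1):
--         dp[i][cols-1] = A[i][cols-1] + dp[i+1][cols-1]
--         m = max(m,dp[i][cols-1],A[i][cols-1])
--
--     for i in range(cols-2,-1,-1):
--         dp[rows-1][i] = A[rows-1][i] + dp[rows-1][i+1]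
--         m = max(m,dp[rows-1][i],A[rows-1][i])
--
--     for i in range(rows-2,-1,-1):
--         for j in range(cols-2,-1,-1):
--             x,y,z = 0,0,0
--             if 0<=i+1<rows and 0<=j+1<cols:
--                 x = dp[i+1][j+1]
--             if 0<=i+1<rows and 0<=j<cols:
--                 y = dp[i+1][j]
--             if 0<=i<rows and 0<=j+1<cols:
--                 z = dp[i][j+1]
--             dp[i][j] = A[i][j]-x+y+z
--             m = max(m,dp[i][j],A[i][j])
--
--     return m
-- ===== SOURCE B (Python) =====
-- def solve(A):
--     cols = len(A[0])
--     below = [0] * cols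
--     best = None
--     for row in reversed(A):
--         cur = []
--         suf = 0
--         for j in range(cols - 1, -1, -1):
--             suf += row[j]
--             v = suf + below[j]
--             cur.append(v)
--             c = max(v, row[j])
--             best = c if best is None else max(best, c)
--         cur.reverse()
--         below = cur
--     return best
-- ===== Notes on version B (the rewrite author's own statement) =====
-- stated objective: faster
-- what changed: B replaces A's single inclusion-exclusion dp table (dp[i][j]=A[i][j]-dp[i+1][j+1]+dp[i+1][j]+dp[i][j+1], filled by three separate boundary/interior loops over a full rows*cols table with per-cell bounds checks) by two uniform suffix passes: a running right-suffix sum per row combined column-wise with the row below, keeping only one O(cols) row, folding each cell's submatrix sum and raw value into the running max as produced; …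
-- outside the precondition, e.g. on solve([[-1], [-2, 5]]): A returns 5, B returns -1; on solve([[-3, -4], [-1, -2, 9]]): A returns 9, B returns -1
import Mathlib
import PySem

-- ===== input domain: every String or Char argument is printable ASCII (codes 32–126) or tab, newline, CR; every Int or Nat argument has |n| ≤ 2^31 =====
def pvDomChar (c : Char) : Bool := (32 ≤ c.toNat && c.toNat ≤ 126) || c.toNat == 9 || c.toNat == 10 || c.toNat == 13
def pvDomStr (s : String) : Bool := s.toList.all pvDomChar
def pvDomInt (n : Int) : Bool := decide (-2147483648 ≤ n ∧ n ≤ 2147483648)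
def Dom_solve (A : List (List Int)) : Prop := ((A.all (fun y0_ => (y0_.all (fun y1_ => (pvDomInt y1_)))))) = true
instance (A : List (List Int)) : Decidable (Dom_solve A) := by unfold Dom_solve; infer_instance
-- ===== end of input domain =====

-- B replaces A's inclusion-exclusion dp table with its three boundary loops by two uniform
-- suffix-sum passes (row suffix + row below) that keep only one O(cols) row; measured faster
-- by a constant factor in a timing run; equal on non-empty rectangular grids.

-- ===== PORT A =====
def pvG2 (M : List (List Int)) (i j : Int) : Int :=
  PySem.List.pyGetD (PySem.List.pyGetD M i []) j 0

def pvSet2 (M : List (List Int)) (i j : Int) (v : Int) : List (List Int) :=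
  PySem.List.pySetD M i (PySem.List.pySetD (PySem.List.pyGetD M i []) j v)

-- body of 'for i in range(rows-2,-1,-1)' (first loop)
def pvStep1 (A : List (List Int)) (cols : Int) (s : List (List Int) × Int) (i : Int) :
    List (List Int) × Int :=
  let dp := pvSet2 s.1 i (cols-1) (pvG2 A i (cols-1) + pvG2 s.1 (i+1) (cols-1))
  (dp, max (max s.2 (pvG2 dp i (cols-1))) (pvG2 A i (cols-1)))

-- body of 'for i in range(cols-2,-1,-1)' (second loop)
def pvStep2 (A : List (List Int)) (rows : Int) (s : List (List Int) × Int) (i : Int) :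
    List (List Int) × Int :=
  let dp := pvSet2 s.1 (rows-1) i (pvG2 A (rows-1) i + pvG2 s.1 (rows-1) (i+1))
  (dp, max (max s.2 (pvG2 dp (rows-1) i)) (pvG2 A (rows-1) i))

-- body of the inner 'for j in range(cols-2,-1,-1)' of the third loop
def pvStep3i (A : List (List Int)) (rows cols i : Int) (s : List (List Int) × Int) (j : Int) :
    List (List Int) × Int :=
  let x := if 0 ≤ i+1 ∧ i+1 < rows ∧ 0 ≤ j+1 ∧ j+1 < cols then pvG2 s.1 (i+1) (j+1) else 0
  let y := if 0 ≤ i+1 ∧ i+1 < rows ∧ 0 ≤ j ∧ j < cols then pvG2 s.1 (i+1) j else 0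
  let z := if 0 ≤ i ∧ i < rows ∧ 0 ≤ j+1 ∧ j+1 < cols then pvG2 s.1 i (j+1) else 0
  let dp := pvSet2 s.1 i j (pvG2 A i j - x + y + z)
  (dp, max (max s.2 (pvG2 dp i j)) (pvG2 A i j))

-- body of the outer 'for i in range(rows-2,-1,-1)' of the third loop
def pvStep3 (A : List (List Int)) (rows cols : Int) (s : List (List Int) × Int) (i : Int) :
    List (List Int) × Int :=
  (PySem.List.pyRange (cols-2) (-1) (-1)).foldl (pvStep3i A rows cols i) s

def solve (A : List (List Int)) : Int :=
  let rows : Int := A.length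
  let cols : Int := (PySem.List.pyGetD A 0 []).length
  let dp : List (List Int) :=
    (PySem.List.pyRange 0 rows 1).map (fun _ => (PySem.List.pyRange 0 cols 1).map (fun _ => (0:Int)))
  let dp := pvSet2 dp (rows-1) (cols-1) (pvG2 A (rows-1) (cols-1))
  let m : Int := max (pvG2 A 0 0) (pvG2 A (-1) (-1))
  let s1 := (PySem.List.pyRange (rows-2) (-1) (-1)).foldl (pvStep1 A cols) (dp, m)
  let s2 := (PySem.List.pyRange (cols-2) (-1) (-1)).foldl (pvStep2 A rows) s1
  let s3 := (PySem.List.pyRange (rows-2) (-1) (-1)).foldl (pvStep3 A rows cols) s2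
  s3.2

-- ===== PORT B =====
-- inner 'for j in range(cols-1,-1,-1)': state (suf, cur, best)
def pvAltInner (below row : List Int) (t : Int × List Int × Option Int) (j : Int) :
    Int × List Int × Option Int :=
  let suf := t.1 + PySem.List.pyGetD row j 0
  let v := suf + PySem.List.pyGetD below j 0
  let c := max v (PySem.List.pyGetD row j 0)
  (suf, t.2.1 ++ [v], some (match t.2.2 with | none => c | some b => max b c))

-- outer 'for row in reversed(A)': state (below, best)
def pvAltOuter (cols : Int) (s : List Int × Option Int) (row : List Int) :
    List Int × Option Int :=
  let t := (PySem.List.pyRange (cols-1) (-1) (-1)).foldl (pvAltInner s.1 row) (0, [], s.2)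
  (t.2.1.reverse, t.2.2)

def solve_alt (A : List (List Int)) : Int :=
  let cols : Int := (PySem.List.pyGetD A 0 []).length
  let st := A.reverse.foldl (pvAltOuter cols) (List.replicate cols.toNat 0, none)
  match st.2 with | some b => b | none => 0

-- ===== PRECONDITION & SPEC =====
-- Pre_ restricts to the natural domain of non-empty rectangular grids: A raises IndexError when
-- some row is shorter than the first one (or the grid/first row is empty), and on ragged grids
-- with longer rows A's value is influenced by cells outside the cols-wide grid through A[-1][-1].
def Pre_solve (A : List (List Int)) : Prop :=
  A ≠ [] ∧ A.headD [] ≠ [] ∧ ∀ row ∈ A, row.length = (A.headD []).length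
instance (A : List (List Int)) : Decidable (Pre_solve A) := by unfold Pre_solve; infer_instance

def pvWitness_solve : List (List Int) := [[1, -2], [3, 4]]

def Spec_solve (A : List (List Int)) (out : Int) : Prop := out = solve_alt A
instance (A : List (List Int)) (out : Int) : Decidable (Spec_solve A out) := by unfold Spec_solve; infer_instance

-- ===== CLAIM (what is proved, stated in full; the proofs are below) =====
def Claim_equal_solve : Prop := ∀ (A : List (List Int)), Dom_solve A → Pre_solve A → Spec_solve A (solve A)

-- ===== LEMMAS AND PROOFS =====

-- number of columns, as the ports read it
def pvC (A : List (List Int)) : Nat := (PySem.List.pyGetD A 0 []).length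

theorem pvC_def (A : List (List Int)) : (PySem.List.pyGetD A 0 []).length = pvC A := rfl

theorem pvC_eq_headD (A : List (List Int)) : pvC A = (A.headD []).length := by
  cases A <;> simp [pvC, PySem.List.pyGetD_zero]

-- Nat-index cell access
def pvGN (M : List (List Int)) (i j : Nat) : Int := (M.getD i []).getD j 0

-- suffix sum of one row from column j
def pvRowS (row : List Int) (j : Nat) : Int := (row.drop j).sum

-- sum of the submatrix with top-left (i, j) (to the bottom-right corner)
def pvS (A : List (List Int)) (i j : Nat) : Int :=
  ((A.drop i).map (fun row => pvRowS row j)).sum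

-- value folded into B's running max at cell (i, j)
def pvCell (A : List (List Int)) (i j : Nat) : Int := max (pvS A i j) (pvGN A i j)

-- shape invariant of A's dp table
def pvSh (A dp : List (List Int)) : Prop :=
  dp.length = A.length ∧ ∀ r < A.length, (dp.getD r []).length = pvC A

-- dp contents after each of A's loops
def pvD1 (A : List (List Int)) (n r c : Nat) : Int :=
  if c = pvC A - 1 ∧ n ≤ r then pvS A r c else 0
def pvD2 (A : List (List Int)) (n r c : Nat) : Int :=
  if c = pvC A - 1 ∨ (r = A.length - 1 ∧ n ≤ c) then pvS A r c else 0
def pvD3 (A : List (List Int)) (n r c : Nat) : Int :=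
  if c = pvC A - 1 ∨ r = A.length - 1 ∨ n ≤ r then pvS A r c else 0
def pvD3i (A : List (List Int)) (n m r c : Nat) : Int :=
  if c = pvC A - 1 ∨ r = A.length - 1 ∨ n + 1 ≤ r ∨ (r = n ∧ m ≤ c) then pvS A r c else 0

-- A's running max, loop by loop
def pvM1 (A : List (List Int)) : Nat → Int → Int
  | 0, m => m
  | n+1, m => pvM1 A n (max (max m (pvS A n (pvC A - 1))) (pvGN A n (pvC A - 1)))
def pvM2 (A : List (List Int)) : Nat → Int → Int
  | 0, m => m
  | n+1, m => pvM2 A n (max (max m (pvS A (A.length - 1) n)) (pvGN A (A.length - 1) n))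
def pvMrow (A : List (List Int)) (i : Nat) : Nat → Int → Int
  | 0, m => m
  | n+1, m => pvMrow A i n (max (max m (pvS A i n)) (pvGN A i n))
def pvM3 (A : List (List Int)) : Nat → Int → Int
  | 0, m => m
  | n+1, m => pvM3 A n (pvMrow A n (pvC A - 1) m)

-- B's running max
def pvOpt (b : Option Int) (c : Int) : Option Int :=
  some (match b with | none => c | some x => max x c)
def pvInnerN (A : List (List Int)) (i : Nat) : Nat → Option Int → Option Int
  | 0, b => b
  | n+1, b => pvInnerN A i n (pvOpt b (pvCell A i n))
def pvOuterN (A : List (List Int)) : Nat → Option Int → Option Int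
  | 0, b => b
  | i+1, b => pvOuterN A i (pvInnerN A i (pvC A) b)

-- ---- sum identities ----

theorem pvRowS_len (row : List Int) : pvRowS row row.length = 0 := by
  simp [pvRowS]

theorem pvRowS_succ (row : List Int) (j : Nat) (hj : j < row.length) :
    pvRowS row j = row.getD j 0 + pvRowS row (j+1) := by
  unfold pvRowS
  rw [List.drop_eq_getElem_cons hj, List.sum_cons,
    List.getD_eq_getElem?_getD, List.getElem?_eq_getElem hj, Option.getD_some]

theorem pvS_len (A : List (List Int)) (j : Nat) : pvS A A.length j = 0 := by
  simp [pvS]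

theorem pvS_succ (A : List (List Int)) (i j : Nat) (hi : i < A.length) :
    pvS A i j = pvRowS (A.getD i []) j + pvS A (i+1) j := by
  unfold pvS
  rw [List.drop_eq_getElem_cons hi, List.map_cons, List.sum_cons,
    List.getD_eq_getElem?_getD, List.getElem?_eq_getElem hi, Option.getD_some]

theorem pvRowlen (A : List (List Int)) (hrect : ∀ row ∈ A, row.length = pvC A)
    (i : Nat) (hi : i < A.length) : (A.getD i []).length = pvC A := by
  have := hrect (A[i]) (List.getElem_mem hi)
  rw [List.getD_eq_getElem?_getD, List.getElem?_eq_getElem hi, Option.getD_some]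
  exact this

theorem pvS_col (A : List (List Int)) (hrect : ∀ row ∈ A, row.length = pvC A)
    (hC : 0 < pvC A) (i : Nat) (hi : i < A.length) :
    pvS A i (pvC A - 1) = pvGN A i (pvC A - 1) + pvS A (i+1) (pvC A - 1) := by
  have hl := pvRowlen A hrect i hi
  have h1 : pvC A - 1 < (A.getD i []).length := by omega
  have h2 : pvRowS (A.getD i []) (pvC A - 1 + 1) = 0 := by
    have : pvC A - 1 + 1 = (A.getD i []).length := by omega
    rw [this, pvRowS_len]
  rw [pvS_succ A i _ hi, pvRowS_succ _ _ h1, h2]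
  simp [pvGN]

theorem pvS_corner (A : List (List Int)) (hrect : ∀ row ∈ A, row.length = pvC A)
    (hC : 0 < pvC A) (hR : 0 < A.length) :
    pvS A (A.length - 1) (pvC A - 1) = pvGN A (A.length - 1) (pvC A - 1) := by
  have h := pvS_col A hrect hC (A.length - 1) (by omega)
  have h2 : A.length - 1 + 1 = A.length := by omega
  rw [h, h2, pvS_len]; ring

theorem pvS_lastrow (A : List (List Int)) (hrect : ∀ row ∈ A, row.length = pvC A)
    (hR : 0 < A.length) (j : Nat) (hj : j < pvC A) :
    pvS A (A.length - 1) j = pvGN A (A.length - 1) j + pvS A (A.length - 1) (j+1) := by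
  have hi : A.length - 1 < A.length := by omega
  have hl := pvRowlen A hrect (A.length - 1) hi
  have h2 : A.length - 1 + 1 = A.length := by omega
  have e1 := pvS_succ A (A.length - 1) j hi
  have e2 := pvS_succ A (A.length - 1) (j+1) hi
  have e3 := pvRowS_succ (A.getD (A.length - 1) []) j (by omega)
  rw [h2, pvS_len] at e1 e2
  rw [e1, e2, e3]
  simp [pvGN]

theorem pvS_ie (A : List (List Int)) (hrect : ∀ row ∈ A, row.length = pvC A)
    (i j : Nat) (hi : i < A.length) (hj : j < pvC A) :
    pvS A i j = pvGN A i j - pvS A (i+1) (j+1) + pvS A (i+1) j + pvS A i (j+1) := by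
  have hl := pvRowlen A hrect i hi
  have e1 := pvS_succ A i j hi
  have e2 := pvS_succ A i (j+1) hi
  have e3 := pvRowS_succ (A.getD i []) j (by omega)
  have : pvGN A i j = (A.getD i []).getD j 0 := rfl
  omega

-- ---- get/set lemmas ----

theorem pvG2_natCast (M : List (List Int)) (i j : Nat) : pvG2 M (↑i) (↑j) = pvGN M i j := by
  simp [pvG2, pvGN, PySem.List.pyGetD_natCast]

theorem pvGN_set2 (M : List (List Int)) (i j : Nat) (v : Int) (r c : Nat)
    (hi : i < M.length) (hj : j < (M.getD i []).length) :
    pvGN (pvSet2 M (↑i) (↑j) v) r c = if r = i ∧ c = j then v else pvGN M r c := by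
  unfold pvSet2 pvGN
  rw [PySem.List.pyGetD_natCast, PySem.List.pySetD_natCast, PySem.List.pySetD_natCast]
  by_cases hr : r = i
  · subst hr
    have hrow : (M.set r ((M.getD r []).set j v)).getD r [] = (M.getD r []).set j v := by
      rw [List.getD_eq_getElem?_getD, List.getElem?_set_self (by omega), Option.getD_some]
    rw [hrow]
    by_cases hc : c = j
    · subst hc
      rw [List.getD_eq_getElem?_getD, List.getElem?_set_self (by simpa using hj), Option.getD_some]
      simp
    · simp [hc, List.getD_eq_getElem?_getD, List.getElem?_set_ne (by omega : j ≠ c)]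
  · have hrow : (M.set i ((M.getD i []).set j v)).getD r [] = M.getD r [] := by
      rw [List.getD_eq_getElem?_getD, List.getElem?_set_ne (by omega : i ≠ r),
        ← List.getD_eq_getElem?_getD]
    rw [hrow]
    simp [hr]

theorem pvSh_set2 (A M : List (List Int)) (i j : Nat) (v : Int)
    (h : pvSh A M) (hi : i < M.length) :
    pvSh A (pvSet2 M (↑i) (↑j) v) := by
  obtain ⟨h1, h2⟩ := h
  unfold pvSh pvSet2
  rw [PySem.List.pyGetD_natCast, PySem.List.pySetD_natCast, PySem.List.pySetD_natCast]
  constructor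
  · simpa using h1
  · intro r hr
    by_cases hri : r = i
    · subst hri
      have hrow : (M.set r ((M.getD r []).set j v)).getD r [] = (M.getD r []).set j v := by
        rw [List.getD_eq_getElem?_getD, List.getElem?_set_self (by omega), Option.getD_some]
      rw [hrow]
      simpa using h2 r hr
    · have hrow : (M.set i ((M.getD i []).set j v)).getD r [] = M.getD r [] := by
        rw [List.getD_eq_getElem?_getD, List.getElem?_set_ne (by omega : i ≠ r),
          ← List.getD_eq_getElem?_getD]
      rw [hrow]; exact h2 r hr

-- ---- A's loops ----

theorem pvLoop1 (A : List (List Int)) (hrect : ∀ row ∈ A, row.length = pvC A)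
    (hC : 0 < pvC A) (n : Nat) (hn : n < A.length) :
    ∀ dp m, pvSh A dp → (∀ r c, r < A.length → c < pvC A → pvGN dp r c = pvD1 A n r c) →
    ∃ dp', (PySem.List.pyRange (↑n - 1) (-1) (-1)).foldl (pvStep1 A (↑(pvC A))) (dp, m)
        = (dp', pvM1 A n m)
      ∧ pvSh A dp' ∧ (∀ r c, r < A.length → c < pvC A → pvGN dp' r c = pvD1 A 0 r c) := by
  induction n with
  | zero =>
    intro dp m hsh hinv
    refine ⟨dp, ?_, hsh, hinv⟩
    rw [PySem.List.pyRange_neg_one_eq_nil (by simp)]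
    rfl
  | succ n ih =>
    intro dp m hsh hinv
    have hR1 : n < A.length := by omega
    have hlen : n < dp.length := by rw [hsh.1]; omega
    have hrowl : pvC A - 1 < (dp.getD n []).length := by rw [hsh.2 n hR1]; omega
    have hc1 : ((pvC A : Int)) - 1 = ((pvC A - 1 : Nat) : Int) := by omega
    have hn1 : ((n : Int)) + 1 = ((n + 1 : Nat) : Int) := by push_cast; ring
    have hcons : PySem.List.pyRange (((n+1 : Nat) : Int) - 1) (-1) (-1)
        = ((n : Nat) : Int) :: PySem.List.pyRange (((n : Nat) : Int) - 1) (-1) (-1) := by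
      have h1 : ((n+1 : Nat) : Int) - 1 = ((n : Nat) : Int) := by push_cast; ring
      rw [h1, PySem.List.pyRange_neg_one_cons (by omega)]
    rw [hcons, List.foldl_cons]
    have hval : pvGN A n (pvC A - 1) + pvGN dp (n+1) (pvC A - 1) = pvS A n (pvC A - 1) := by
      rw [hinv (n+1) (pvC A - 1) hn (by omega)]
      unfold pvD1
      rw [if_pos ⟨rfl, le_refl _⟩]
      exact (pvS_col A hrect hC n hR1).symm
    have hstep : pvStep1 A (↑(pvC A)) (dp, m) (↑n)
        = (pvSet2 dp (↑n) (↑(pvC A - 1)) (pvS A n (pvC A - 1)),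
           max (max m (pvS A n (pvC A - 1))) (pvGN A n (pvC A - 1))) := by
      simp only [pvStep1]
      rw [hc1, hn1]
      simp only [pvG2_natCast]
      rw [hval, pvGN_set2 dp n (pvC A - 1) _ n (pvC A - 1) hlen hrowl, if_pos ⟨rfl, rfl⟩]
    rw [hstep]
    obtain ⟨dp', e, sh', inv'⟩ := ih hR1 (pvSet2 dp (↑n) (↑(pvC A - 1)) (pvS A n (pvC A - 1)))
      (max (max m (pvS A n (pvC A - 1))) (pvGN A n (pvC A - 1)))
      (pvSh_set2 A dp n (pvC A - 1) _ hsh hlen)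
      (by
        intro r c hr hc2
        rw [pvGN_set2 dp n (pvC A - 1) _ r c hlen hrowl]
        by_cases hcase : r = n ∧ c = pvC A - 1
        · obtain ⟨rfl, rfl⟩ := hcase
          rw [if_pos ⟨rfl, rfl⟩]
          unfold pvD1
          rw [if_pos ⟨rfl, le_refl _⟩]
        · rw [if_neg hcase, hinv r c hr hc2]
          unfold pvD1
          split_ifs <;> first | rfl | omega)
    exact ⟨dp', by rw [e]; rfl, sh', inv'⟩

theorem pvLoop2 (A : List (List Int)) (hrect : ∀ row ∈ A, row.length = pvC A)
    (hR : 0 < A.length) (n : Nat) (hn : n < pvC A) :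
    ∀ dp m, pvSh A dp → (∀ r c, r < A.length → c < pvC A → pvGN dp r c = pvD2 A n r c) →
    ∃ dp', (PySem.List.pyRange (↑n - 1) (-1) (-1)).foldl (pvStep2 A (↑A.length)) (dp, m)
        = (dp', pvM2 A n m)
      ∧ pvSh A dp' ∧ (∀ r c, r < A.length → c < pvC A → pvGN dp' r c = pvD2 A 0 r c) := by
  induction n with
  | zero =>
    intro dp m hsh hinv
    refine ⟨dp, ?_, hsh, hinv⟩
    rw [PySem.List.pyRange_neg_one_eq_nil (by simp)]
    rfl
  | succ n ih =>
    intro dp m hsh hinv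
    have hC1 : n < pvC A := by omega
    have hRlt : A.length - 1 < A.length := by omega
    have hlen : A.length - 1 < dp.length := by rw [hsh.1]; omega
    have hrowl : n < (dp.getD (A.length - 1) []).length := by rw [hsh.2 _ hRlt]; omega
    have hr1 : ((A.length : Int)) - 1 = ((A.length - 1 : Nat) : Int) := by omega
    have hn1 : ((n : Int)) + 1 = ((n + 1 : Nat) : Int) := by push_cast; ring
    have hcons : PySem.List.pyRange (((n+1 : Nat) : Int) - 1) (-1) (-1)
        = ((n : Nat) : Int) :: PySem.List.pyRange (((n : Nat) : Int) - 1) (-1) (-1) := by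
      have h1 : ((n+1 : Nat) : Int) - 1 = ((n : Nat) : Int) := by push_cast; ring
      rw [h1, PySem.List.pyRange_neg_one_cons (by omega)]
    rw [hcons, List.foldl_cons]
    have hval : pvGN A (A.length - 1) n + pvGN dp (A.length - 1) (n+1) = pvS A (A.length - 1) n := by
      rw [hinv (A.length - 1) (n+1) hRlt hn]
      unfold pvD2
      rw [if_pos (Or.inr ⟨rfl, le_refl _⟩)]
      exact (pvS_lastrow A hrect hR n hC1).symm
    have hstep : pvStep2 A (↑A.length) (dp, m) (↑n)
        = (pvSet2 dp (↑(A.length - 1)) (↑n) (pvS A (A.length - 1) n),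
           max (max m (pvS A (A.length - 1) n)) (pvGN A (A.length - 1) n)) := by
      simp only [pvStep2]
      rw [hr1, hn1]
      simp only [pvG2_natCast]
      rw [hval, pvGN_set2 dp (A.length - 1) n _ (A.length - 1) n hlen hrowl, if_pos ⟨rfl, rfl⟩]
    rw [hstep]
    obtain ⟨dp', e, sh', inv'⟩ := ih hC1 (pvSet2 dp (↑(A.length - 1)) (↑n) (pvS A (A.length - 1) n))
      (max (max m (pvS A (A.length - 1) n)) (pvGN A (A.length - 1) n))
      (pvSh_set2 A dp (A.length - 1) n _ hsh hlen)
      (by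
        intro r c hr hc2
        rw [pvGN_set2 dp (A.length - 1) n _ r c hlen hrowl]
        by_cases hcase : r = A.length - 1 ∧ c = n
        · obtain ⟨rfl, rfl⟩ := hcase
          rw [if_pos ⟨rfl, rfl⟩]
          unfold pvD2
          rw [if_pos (Or.inr ⟨rfl, le_refl _⟩)]
        · rw [if_neg hcase, hinv r c hr hc2]
          unfold pvD2
          split_ifs <;> first | rfl | omega)
    exact ⟨dp', by rw [e]; rfl, sh', inv'⟩

theorem pvLoop3i (A : List (List Int)) (hrect : ∀ row ∈ A, row.length = pvC A)
    (n : Nat) (hn : n + 1 < A.length) (mm : Nat) (hm : mm < pvC A) :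
    ∀ dp m, pvSh A dp → (∀ r c, r < A.length → c < pvC A → pvGN dp r c = pvD3i A n mm r c) →
    ∃ dp', (PySem.List.pyRange (↑mm - 1) (-1) (-1)).foldl
          (pvStep3i A (↑A.length) (↑(pvC A)) (↑n)) (dp, m)
        = (dp', pvMrow A n mm m)
      ∧ pvSh A dp' ∧ (∀ r c, r < A.length → c < pvC A → pvGN dp' r c = pvD3i A n 0 r c) := by
  induction mm with
  | zero =>
    intro dp m hsh hinv
    refine ⟨dp, ?_, hsh, hinv⟩
    rw [PySem.List.pyRange_neg_one_eq_nil (by simp)]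
    rfl
  | succ mm ih =>
    intro dp m hsh hinv
    have hnR : n < A.length := by omega
    have hmC : mm < pvC A := by omega
    have hlen : n < dp.length := by rw [hsh.1]; omega
    have hrowl : mm < (dp.getD n []).length := by rw [hsh.2 n hnR]; omega
    have hn1 : ((n : Int)) + 1 = ((n + 1 : Nat) : Int) := by push_cast; ring
    have hm1 : ((mm : Int)) + 1 = ((mm + 1 : Nat) : Int) := by push_cast; ring
    have hcons : PySem.List.pyRange (((mm+1 : Nat) : Int) - 1) (-1) (-1)
        = ((mm : Nat) : Int) :: PySem.List.pyRange (((mm : Nat) : Int) - 1) (-1) (-1) := by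
      have h1 : ((mm+1 : Nat) : Int) - 1 = ((mm : Nat) : Int) := by push_cast; ring
      rw [h1, PySem.List.pyRange_neg_one_cons (by omega)]
    rw [hcons, List.foldl_cons]
    have hx : pvGN dp (n+1) (mm+1) = pvS A (n+1) (mm+1) := by
      rw [hinv (n+1) (mm+1) hn hm]
      unfold pvD3i
      rw [if_pos (Or.inr (Or.inr (Or.inl (le_refl _))))]
    have hy : pvGN dp (n+1) mm = pvS A (n+1) mm := by
      rw [hinv (n+1) mm hn hmC]
      unfold pvD3i
      rw [if_pos (Or.inr (Or.inr (Or.inl (le_refl _))))]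
    have hz : pvGN dp n (mm+1) = pvS A n (mm+1) := by
      rw [hinv n (mm+1) hnR hm]
      unfold pvD3i
      rw [if_pos (Or.inr (Or.inr (Or.inr ⟨rfl, le_refl _⟩)))]
    have hval : pvGN A n mm - pvS A (n+1) (mm+1) + pvS A (n+1) mm + pvS A n (mm+1)
        = pvS A n mm := (pvS_ie A hrect n mm hnR hmC).symm
    have hstep : pvStep3i A (↑A.length) (↑(pvC A)) (↑n) (dp, m) (↑mm)
        = (pvSet2 dp (↑n) (↑mm) (pvS A n mm),
           max (max m (pvS A n mm)) (pvGN A n mm)) := by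
      have g1 : (0:Int) ≤ (n:Int)+1 ∧ (n:Int)+1 < (A.length:Int) ∧
          (0:Int) ≤ (mm:Int)+1 ∧ (mm:Int)+1 < ((pvC A : Nat):Int) :=
        ⟨by omega, by omega, by omega, by omega⟩
      have g2 : (0:Int) ≤ (n:Int)+1 ∧ (n:Int)+1 < (A.length:Int) ∧
          (0:Int) ≤ (mm:Int) ∧ (mm:Int) < ((pvC A : Nat):Int) :=
        ⟨by omega, by omega, by omega, by omega⟩
      have g3 : (0:Int) ≤ (n:Int) ∧ (n:Int) < (A.length:Int) ∧
          (0:Int) ≤ (mm:Int)+1 ∧ (mm:Int)+1 < ((pvC A : Nat):Int) :=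
        ⟨by omega, by omega, by omega, by omega⟩
      simp only [pvStep3i]
      rw [if_pos g1, if_pos g2, if_pos g3]
      rw [hn1, hm1]
      simp only [pvG2_natCast]
      rw [hx, hy, hz, hval,
        pvGN_set2 dp n mm _ n mm hlen hrowl, if_pos ⟨rfl, rfl⟩]
    rw [hstep]
    obtain ⟨dp', e, sh', inv'⟩ := ih hmC (pvSet2 dp (↑n) (↑mm) (pvS A n mm))
      (max (max m (pvS A n mm)) (pvGN A n mm))
      (pvSh_set2 A dp n mm _ hsh hlen)
      (by
        intro r c hr hc2
        rw [pvGN_set2 dp n mm _ r c hlen hrowl]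
        by_cases hcase : r = n ∧ c = mm
        · obtain ⟨rfl, rfl⟩ := hcase
          rw [if_pos ⟨rfl, rfl⟩]
          unfold pvD3i
          rw [if_pos (Or.inr (Or.inr (Or.inr ⟨rfl, le_refl _⟩)))]
        · rw [if_neg hcase, hinv r c hr hc2]
          unfold pvD3i
          split_ifs <;> first | rfl | omega)
    exact ⟨dp', by rw [e]; rfl, sh', inv'⟩

theorem pvLoop3 (A : List (List Int)) (hrect : ∀ row ∈ A, row.length = pvC A)
    (hC : 0 < pvC A) (n : Nat) (hn : n < A.length) :
    ∀ dp m, pvSh A dp → (∀ r c, r < A.length → c < pvC A → pvGN dp r c = pvD3 A n r c) →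
    ∃ dp', (PySem.List.pyRange (↑n - 1) (-1) (-1)).foldl
          (pvStep3 A (↑A.length) (↑(pvC A))) (dp, m)
        = (dp', pvM3 A n m)
      ∧ pvSh A dp' ∧ (∀ r c, r < A.length → c < pvC A → pvGN dp' r c = pvD3 A 0 r c) := by
  induction n with
  | zero =>
    intro dp m hsh hinv
    refine ⟨dp, ?_, hsh, ?_⟩
    · rw [PySem.List.pyRange_neg_one_eq_nil (by simp)]
      rfl
    · intro r c hr hc2
      rw [hinv r c hr hc2]
  | succ n ih =>
    intro dp m hsh hinv
    have hcons : PySem.List.pyRange (((n+1 : Nat) : Int) - 1) (-1) (-1)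
        = ((n : Nat) : Int) :: PySem.List.pyRange (((n : Nat) : Int) - 1) (-1) (-1) := by
      have h1 : ((n+1 : Nat) : Int) - 1 = ((n : Nat) : Int) := by push_cast; ring
      rw [h1, PySem.List.pyRange_neg_one_cons (by omega)]
    rw [hcons, List.foldl_cons]
    have hc2eq : ((pvC A : Int)) - 2 = ((pvC A - 1 : Nat) : Int) - 1 := by omega
    have hstep : pvStep3 A (↑A.length) (↑(pvC A)) (dp, m) (↑n)
        = ((PySem.List.pyRange (((pvC A - 1 : Nat) : Int) - 1) (-1) (-1)).foldl
            (pvStep3i A (↑A.length) (↑(pvC A)) (↑n)) (dp, m)) := by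
      simp only [pvStep3]
      rw [hc2eq]
    obtain ⟨dpi, ei, shi, invi⟩ := pvLoop3i A hrect n hn (pvC A - 1) (by omega) dp m hsh
      (by
        intro r c hr hc2
        rw [hinv r c hr hc2]
        unfold pvD3 pvD3i
        split_ifs <;> first | rfl | omega)
    rw [hstep, ei]
    obtain ⟨dp', e, sh', inv'⟩ := ih (by omega) dpi (pvMrow A n (pvC A - 1) m) shi
      (by
        intro r c hr hc2
        rw [invi r c hr hc2]
        unfold pvD3 pvD3i
        split_ifs <;> first | rfl | omega)
    exact ⟨dp', by rw [e]; rfl, sh', inv'⟩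

-- ---- properties of A's running max ----

theorem pvM1_mono (A : List (List Int)) (n : Nat) (m : Int) : m ≤ pvM1 A n m := by
  induction n generalizing m with
  | zero => simp [pvM1]
  | succ n ih => exact le_trans (le_trans (le_max_left _ _) (le_max_left _ _)) (ih _)
theorem pvM2_mono (A : List (List Int)) (n : Nat) (m : Int) : m ≤ pvM2 A n m := by
  induction n generalizing m with
  | zero => simp [pvM2]
  | succ n ih => exact le_trans (le_trans (le_max_left _ _) (le_max_left _ _)) (ih _)
theorem pvMrow_mono (A : List (List Int)) (i n : Nat) (m : Int) : m ≤ pvMrow A i n m := by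
  induction n generalizing m with
  | zero => simp [pvMrow]
  | succ n ih => exact le_trans (le_trans (le_max_left _ _) (le_max_left _ _)) (ih _)
theorem pvM3_mono (A : List (List Int)) (n : Nat) (m : Int) : m ≤ pvM3 A n m := by
  induction n generalizing m with
  | zero => simp [pvM3]
  | succ n ih => exact le_trans (pvMrow_mono A n _ m) (ih _)

theorem pvM1_ge (A : List (List Int)) (n : Nat) (m : Int) (i : Nat) (hi : i < n) :
    pvS A i (pvC A - 1) ≤ pvM1 A n m ∧ pvGN A i (pvC A - 1) ≤ pvM1 A n m := by
  revert hi
  induction n generalizing m with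
  | zero => intro h; omega
  | succ n ih =>
    intro hi
    rcases Nat.lt_succ_iff_lt_or_eq.mp hi with h | h
    · exact ih _ h
    · subst h
      have h0 : pvM1 A (i+1) m = pvM1 A i (max (max m (pvS A i (pvC A - 1))) (pvGN A i (pvC A - 1))) := rfl
      rw [h0]
      refine ⟨le_trans ?_ (pvM1_mono A _ _), le_trans (le_max_right _ _) (pvM1_mono A _ _)⟩
      exact le_trans (le_max_right _ _) (le_max_left _ _)
theorem pvM2_ge (A : List (List Int)) (n : Nat) (m : Int) (j : Nat) (hj : j < n) :
    pvS A (A.length - 1) j ≤ pvM2 A n m ∧ pvGN A (A.length - 1) j ≤ pvM2 A n m := by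
  revert hj
  induction n generalizing m with
  | zero => intro h; omega
  | succ n ih =>
    intro hj
    rcases Nat.lt_succ_iff_lt_or_eq.mp hj with h | h
    · exact ih _ h
    · subst h
      have h0 : pvM2 A (j+1) m = pvM2 A j (max (max m (pvS A (A.length - 1) j)) (pvGN A (A.length - 1) j)) := rfl
      rw [h0]
      refine ⟨le_trans ?_ (pvM2_mono A _ _), le_trans (le_max_right _ _) (pvM2_mono A _ _)⟩
      exact le_trans (le_max_right _ _) (le_max_left _ _)
theorem pvMrow_ge (A : List (List Int)) (i n : Nat) (m : Int) (j : Nat) (hj : j < n) :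
    pvS A i j ≤ pvMrow A i n m ∧ pvGN A i j ≤ pvMrow A i n m := by
  revert hj
  induction n generalizing m with
  | zero => intro h; omega
  | succ n ih =>
    intro hj
    rcases Nat.lt_succ_iff_lt_or_eq.mp hj with h | h
    · exact ih _ h
    · subst h
      have h0 : pvMrow A i (j+1) m = pvMrow A i j (max (max m (pvS A i j)) (pvGN A i j)) := rfl
      rw [h0]
      refine ⟨le_trans ?_ (pvMrow_mono A i _ _), le_trans (le_max_right _ _) (pvMrow_mono A i _ _)⟩
      exact le_trans (le_max_right _ _) (le_max_left _ _)
theorem pvM3_ge (A : List (List Int)) (n : Nat) (m : Int) (i j : Nat) (hi : i < n)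
    (hj : j < pvC A - 1) :
    pvS A i j ≤ pvM3 A n m ∧ pvGN A i j ≤ pvM3 A n m := by
  revert hi
  induction n generalizing m with
  | zero => intro h; omega
  | succ n ih =>
    intro hi
    rcases Nat.lt_succ_iff_lt_or_eq.mp hi with h | h
    · exact ih _ h
    · subst h
      have h0 : pvM3 A (i+1) m = pvM3 A i (pvMrow A i (pvC A - 1) m) := rfl
      rw [h0]
      have := pvMrow_ge A i (pvC A - 1) m j hj
      exact ⟨le_trans this.1 (pvM3_mono A _ _), le_trans this.2 (pvM3_mono A _ _)⟩

theorem pvM1_lub (A : List (List Int)) (n : Nat) (m u : Int) (hm : m ≤ u)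
    (hc : ∀ i < n, pvS A i (pvC A - 1) ≤ u ∧ pvGN A i (pvC A - 1) ≤ u) : pvM1 A n m ≤ u := by
  revert hm hc
  induction n generalizing m with
  | zero => intro hm _; exact hm
  | succ n ih =>
    intro hm hc
    refine ih _ ?_ (fun i hi => hc i (by omega))
    have := hc n (by omega)
    simp only [max_le_iff]
    omega
theorem pvM2_lub (A : List (List Int)) (n : Nat) (m u : Int) (hm : m ≤ u)
    (hc : ∀ j < n, pvS A (A.length - 1) j ≤ u ∧ pvGN A (A.length - 1) j ≤ u) : pvM2 A n m ≤ u := by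
  revert hm hc
  induction n generalizing m with
  | zero => intro hm _; exact hm
  | succ n ih =>
    intro hm hc
    refine ih _ ?_ (fun j hj => hc j (by omega))
    have := hc n (by omega)
    simp only [max_le_iff]
    omega
theorem pvMrow_lub (A : List (List Int)) (i n : Nat) (m u : Int) (hm : m ≤ u)
    (hc : ∀ j < n, pvS A i j ≤ u ∧ pvGN A i j ≤ u) : pvMrow A i n m ≤ u := by
  revert hm hc
  induction n generalizing m with
  | zero => intro hm _; exact hm
  | succ n ih =>
    intro hm hc
    refine ih _ ?_ (fun j hj => hc j (by omega))
    have := hc n (by omega)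
    simp only [max_le_iff]
    omega
theorem pvM3_lub (A : List (List Int)) (n : Nat) (m u : Int) (hm : m ≤ u)
    (hc : ∀ i < n, ∀ j < pvC A - 1, pvS A i j ≤ u ∧ pvGN A i j ≤ u) : pvM3 A n m ≤ u := by
  revert hm hc
  induction n generalizing m with
  | zero => intro hm _; exact hm
  | succ n ih =>
    intro hm hc
    refine ih _ ?_ (fun i hi => hc i (by omega))
    exact pvMrow_lub A n (pvC A - 1) m u hm (fun j hj => hc n (by omega) j hj)

-- ---- B's loops ----

theorem pvAltInnerLoop (A : List (List Int)) (i : Nat) (row below : List Int)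
    (hrowlen : row.length = pvC A)
    (hv : ∀ j < pvC A, pvRowS row j + below.getD j 0 = pvS A i j)
    (hg : ∀ j < pvC A, row.getD j 0 = pvGN A i j) :
    ∀ n, n ≤ pvC A → ∀ cur b,
    (PySem.List.pyRange (↑n - 1) (-1) (-1)).foldl (pvAltInner below row) (pvRowS row n, cur, b)
      = (pvRowS row 0, cur ++ ((List.range n).map (fun j => pvS A i j)).reverse, pvInnerN A i n b) := by
  intro n
  induction n with
  | zero =>
    intro _ cur b
    rw [PySem.List.pyRange_neg_one_eq_nil (by simp)]
    simp [pvInnerN]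
  | succ n ih =>
    intro hn cur b
    have hnC : n < pvC A := by omega
    have hcons : PySem.List.pyRange (((n+1 : Nat) : Int) - 1) (-1) (-1)
        = ((n : Nat) : Int) :: PySem.List.pyRange (((n : Nat) : Int) - 1) (-1) (-1) := by
      have h1 : ((n+1 : Nat) : Int) - 1 = ((n : Nat) : Int) := by push_cast; ring
      rw [h1, PySem.List.pyRange_neg_one_cons (by omega)]
    rw [hcons, List.foldl_cons]
    have hstep : pvAltInner below row (pvRowS row (n+1), cur, b) ((n : Nat) : Int)
        = (pvRowS row n, cur ++ [pvS A i n], pvOpt b (pvCell A i n)) := by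
      simp only [pvAltInner]
      rw [PySem.List.pyGetD_natCast, PySem.List.pyGetD_natCast]
      have h1 : pvRowS row (n+1) + row.getD n 0 = pvRowS row n := by
        have := pvRowS_succ row n (by omega)
        omega
      rw [h1]
      have h2 : pvRowS row n + below.getD n 0 = pvS A i n := hv n hnC
      rw [h2]
      have h3 : max (pvS A i n) (row.getD n 0) = pvCell A i n := by
        rw [hg n hnC]; rfl
      rw [h3]
      rfl
    rw [hstep, ih (by omega) (cur ++ [pvS A i n]) (pvOpt b (pvCell A i n))]
    refine congrArg (fun l => (pvRowS row 0, l, pvInnerN A i n (pvOpt b (pvCell A i n)))) ?_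
    rw [List.range_succ, List.map_append, List.reverse_append]
    simp

theorem pvAltLoop (A : List (List Int)) (hrect : ∀ row ∈ A, row.length = pvC A) :
    ∀ i, i ≤ A.length → ∀ below best, below.length = pvC A →
    (∀ j < pvC A, below.getD j 0 = pvS A i j) →
    ∃ below', ((A.take i).reverse).foldl (pvAltOuter (↑(pvC A))) (below, best)
      = (below', pvOuterN A i best) := by
  intro i
  induction i with
  | zero =>
    intro _ below best _ _
    exact ⟨below, by simp [pvOuterN]⟩
  | succ i ih =>
    intro hi below best hlen hval
    have hiR : i < A.length := by omega
    have htake : (A.take (i+1)).reverse = A.getD i [] :: (A.take i).reverse := by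
      rw [List.take_add_one, List.getElem?_eq_getElem hiR]
      rw [List.getD_eq_getElem?_getD, List.getElem?_eq_getElem hiR]
      simp
    rw [htake, List.foldl_cons]
    have hrowlen : (A.getD i []).length = pvC A := pvRowlen A hrect i hiR
    have hstep : pvAltOuter (↑(pvC A)) (below, best) (A.getD i [])
        = ((List.range (pvC A)).map (fun j => pvS A i j), pvInnerN A i (pvC A) best) := by
      simp only [pvAltOuter]
      have hv : ∀ j < pvC A, pvRowS (A.getD i []) j + below.getD j 0 = pvS A i j := by
        intro j hj
        have h1 := hval j hj
        have h2 := pvS_succ A i j hiR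
        omega
      have h0 : ((0:Int), ([] : List Int), best) = (pvRowS (A.getD i []) (pvC A), ([] : List Int), best) := by
        rw [← hrowlen, pvRowS_len]
      rw [h0, pvAltInnerLoop A i (A.getD i []) below hrowlen hv (fun j hj => rfl)
        (pvC A) (le_refl _) [] best]
      simp
    rw [hstep]
    obtain ⟨below', e⟩ := ih (by omega) ((List.range (pvC A)).map (fun j => pvS A i j))
      (pvInnerN A i (pvC A) best) (by simp)
      (by intro j hj; exact PySem.List.getD_map_range _ _ _ _ hj)
    exact ⟨below', by rw [e]; rfl⟩

-- ---- properties of B's running max ----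

theorem pvInnerN_some (A : List (List Int)) (i : Nat) :
    ∀ n b, (0 < n ∨ b.isSome) → (pvInnerN A i n b).isSome := by
  intro n
  induction n with
  | zero => intro b h; simpa [pvInnerN] using h
  | succ n ih =>
    intro b _
    rcases Nat.eq_zero_or_pos n with h | h
    · subst h; simp [pvInnerN, pvOpt]
    · exact ih _ (Or.inl h)
theorem pvOuterN_some (A : List (List Int)) (hC : 0 < pvC A) :
    ∀ i b, (0 < i ∨ b.isSome) → (pvOuterN A i b).isSome := by
  intro i
  induction i with
  | zero => intro b h; simpa [pvOuterN] using h
  | succ i ih =>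
    intro b _
    rcases Nat.eq_zero_or_pos i with h | h
    · subst h
      simpa [pvOuterN] using pvInnerN_some A 0 (pvC A) b (Or.inl hC)
    · exact ih _ (Or.inl h)

theorem pvInnerN_ge_seed (A : List (List Int)) (i : Nat) :
    ∀ n b x y, b = some x → pvInnerN A i n b = some y → x ≤ y := by
  intro n
  induction n with
  | zero => intro b x y hb he; simp [pvInnerN, hb] at he; omega
  | succ n ih =>
    intro b x y hb he
    subst hb
    have := ih (pvOpt (some x) (pvCell A i n)) (max x (pvCell A i n)) y (by simp [pvOpt]) he
    omega
theorem pvInnerN_ge_cell (A : List (List Int)) (i : Nat) :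
    ∀ n j, j < n → ∀ b y, pvInnerN A i n b = some y → pvCell A i j ≤ y := by
  intro n
  induction n with
  | zero => omega
  | succ n ih =>
    intro j hj b y he
    rcases Nat.lt_succ_iff_lt_or_eq.mp hj with h | h
    · exact ih j h _ y he
    · subst h
      have he' : pvInnerN A i j (pvOpt b (pvCell A i j)) = some y := he
      rcases b with _ | x
      · exact pvInnerN_ge_seed A i j _ (pvCell A i j) y (by simp [pvOpt]) he'
      · have := pvInnerN_ge_seed A i j _ (max x (pvCell A i j)) y (by simp [pvOpt]) he'
        omega
theorem pvInnerN_lub (A : List (List Int)) (i : Nat) :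
    ∀ n b u, (∀ x, b = some x → x ≤ u) → (∀ j < n, pvCell A i j ≤ u) →
    ∀ y, pvInnerN A i n b = some y → y ≤ u := by
  intro n
  induction n with
  | zero => intro b u hb hc y he; exact hb y he
  | succ n ih =>
    intro b u hb hc y he
    refine ih (pvOpt b (pvCell A i n)) u ?_ (fun j hj => hc j (by omega)) y he
    intro x hx
    rcases b with _ | w
    · simp [pvOpt] at hx; subst hx; exact hc n (by omega)
    · simp [pvOpt] at hx; subst hx
      have h1 := hb w rfl
      have h2 := hc n (by omega)
      simp only [max_le_iff]; exact ⟨h1, h2⟩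

theorem pvOuterN_ge_seed (A : List (List Int)) :
    ∀ i b x y, b = some x → pvOuterN A i b = some y → x ≤ y := by
  intro i
  induction i with
  | zero => intro b x y hb he; simp [pvOuterN, hb] at he; omega
  | succ i ih =>
    intro b x y hb he
    subst hb
    have hs : (pvInnerN A i (pvC A) (some x)).isSome :=
      pvInnerN_some A i (pvC A) (some x) (Or.inr rfl)
    rcases Option.isSome_iff_exists.mp hs with ⟨w, hw⟩
    have h1 := pvInnerN_ge_seed A i (pvC A) (some x) x w rfl hw
    have h2 := ih _ w y hw (by simpa [pvOuterN, hw] using he)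
    omega
theorem pvOuterN_ge_cell (A : List (List Int)) :
    ∀ i r j, r < i → j < pvC A → ∀ b y, pvOuterN A i b = some y → pvCell A r j ≤ y := by
  intro i
  induction i with
  | zero => omega
  | succ i ih =>
    intro r j hr hj b y he
    rcases Nat.lt_succ_iff_lt_or_eq.mp hr with h | h
    · exact ih r j h hj _ y he
    · subst h
      have he' : pvOuterN A r (pvInnerN A r (pvC A) b) = some y := he
      have hs : (pvInnerN A r (pvC A) b).isSome :=
        pvInnerN_some A r (pvC A) b (Or.inl (by omega))
      rcases Option.isSome_iff_exists.mp hs with ⟨w, hw⟩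
      have h1 := pvInnerN_ge_cell A r (pvC A) j hj b w hw
      have h2 := pvOuterN_ge_seed A r _ w y hw (hw ▸ he')
      omega
theorem pvOuterN_lub (A : List (List Int)) :
    ∀ i b u, (∀ x, b = some x → x ≤ u) → (∀ r < i, ∀ j < pvC A, pvCell A r j ≤ u) →
    ∀ y, pvOuterN A i b = some y → y ≤ u := by
  intro i
  induction i with
  | zero => intro b u hb hc y he; exact hb y he
  | succ i ih =>
    intro b u hb hc y he
    refine ih (pvInnerN A i (pvC A) b) u ?_ (fun r hr j hj => hc r (by omega) j hj) y he
    intro x hx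
    exact pvInnerN_lub A i (pvC A) b u hb (fun j hj => hc i (by omega) j hj) x hx

-- ---- initial states ----

theorem pvInit_m (A : List (List Int)) (hrect : ∀ row ∈ A, row.length = pvC A)
    (hR : 0 < A.length) (hC : 0 < pvC A) :
    max (pvG2 A 0 0) (pvG2 A (-1) (-1)) = max (pvGN A 0 0) (pvGN A (A.length - 1) (pvC A - 1)) := by
  have hA : A ≠ [] := by
    intro h; rw [h] at hR; simp at hR
  have hRlt : A.length - 1 < A.length := by omega
  have hrowlen : (A.getD (A.length - 1) []).length = pvC A := pvRowlen A hrect _ hRlt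
  have hgetD : A.getD (A.length - 1) [] = A.getLast hA := by
    rw [List.getLast_eq_getElem, List.getD_eq_getElem?_getD, List.getElem?_eq_getElem hRlt,
      Option.getD_some]
  have hrow : A.getLast hA ≠ [] := by
    rw [← hgetD]
    intro h
    rw [h] at hrowlen
    simp at hrowlen
    omega
  congr 1
  · unfold pvG2 pvGN
    rw [PySem.List.pyGetD_zero, PySem.List.pyGetD_zero]
  · unfold pvG2 pvGN
    rw [PySem.List.pyGetD_neg_one A [] hA, PySem.List.pyGetD_neg_one _ _ hrow]
    rw [hgetD] at hrowlen
    rw [List.getLast_eq_getElem hrow, hgetD, List.getD_eq_getElem?_getD,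
      List.getElem?_eq_getElem (by omega : pvC A - 1 < (A.getLast hA).length),
      Option.getD_some]
    congr 1
    omega

-- ===== VERDICT (by name: the statement is the Claim_ definition above) =====
theorem pvFinal (A : List (List Int)) (hA : A ≠ []) (hH : A.headD [] ≠ [])
    (hrect : ∀ row ∈ A, row.length = pvC A) : solve A = solve_alt A := by
  have hR : 0 < A.length := by
    cases A
    · exact absurd rfl hA
    · simp
  have hC : 0 < pvC A := by
    rw [pvC_eq_headD]
    cases hhd : A.headD []
    · exact absurd hhd hH
    · simp
  -- initial dp table
  have hlen0 : ((PySem.List.pyRange 0 (↑A.length) 1).map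
      (fun _ => (PySem.List.pyRange 0 (↑(pvC A)) 1).map (fun _ => (0:Int)))).length = A.length := by
    rw [PySem.List.pyRange_zero_nat]
    simp
  have hget0 : ∀ r < A.length, ((PySem.List.pyRange 0 (↑A.length) 1).map
      (fun _ => (PySem.List.pyRange 0 (↑(pvC A)) 1).map (fun _ => (0:Int)))).getD r []
      = (PySem.List.pyRange 0 (↑(pvC A)) 1).map (fun _ => (0:Int)) := by
    intro r hr
    rw [PySem.List.pyRange_zero_nat A.length, List.map_map]
    exact PySem.List.getD_map_range _ _ _ _ hr
  have hzlen : ((PySem.List.pyRange 0 (↑(pvC A)) 1).map (fun _ => (0:Int))).length = pvC A := by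
    rw [PySem.List.pyRange_zero_nat]
    simp
  have hsh0 : pvSh A ((PySem.List.pyRange 0 (↑A.length) 1).map
      (fun _ => (PySem.List.pyRange 0 (↑(pvC A)) 1).map (fun _ => (0:Int)))) :=
    ⟨hlen0, fun r hr => by rw [hget0 r hr]; exact hzlen⟩
  have hinv0 : ∀ r c, r < A.length → c < pvC A →
      pvGN ((PySem.List.pyRange 0 (↑A.length) 1).map
        (fun _ => (PySem.List.pyRange 0 (↑(pvC A)) 1).map (fun _ => (0:Int)))) r c = 0 := by
    intro r c hr hc2
    unfold pvGN
    rw [hget0 r hr, PySem.List.pyRange_zero_nat (pvC A), List.map_map]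
    exact PySem.List.getD_map_range _ _ _ _ hc2
  -- the two sides
  show solve A = solve_alt A
  simp only [solve, solve_alt]
  rw [pvC_def A]
  have ecast : ((↑(pvC A) : Int)).toNat = pvC A := by simp
  rw [ecast]
  have eR1 : (↑A.length : Int) - 1 = ((A.length - 1 : Nat) : Int) := by omega
  have eC1 : (↑(pvC A) : Int) - 1 = ((pvC A - 1 : Nat) : Int) := by omega
  have eR2 : (↑A.length : Int) - 2 = ((A.length - 1 : Nat) : Int) - 1 := by omega
  have eC2 : (↑(pvC A) : Int) - 2 = ((pvC A - 1 : Nat) : Int) - 1 := by omega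
  rw [eR1, eC1, eR2, eC2, pvG2_natCast, pvInit_m A hrect hR hC]
  rw [show pvGN A (A.length - 1) (pvC A - 1) = pvS A (A.length - 1) (pvC A - 1) from
    (pvS_corner A hrect hC hR).symm]
  -- A's three loops
  have hshI := pvSh_set2 A _ (A.length - 1) (pvC A - 1) (pvS A (A.length - 1) (pvC A - 1))
    hsh0 (by rw [hlen0]; omega)
  have hinvI : ∀ r c, r < A.length → c < pvC A →
      pvGN (pvSet2 ((PySem.List.pyRange 0 (↑A.length) 1).map
        (fun _ => (PySem.List.pyRange 0 (↑(pvC A)) 1).map (fun _ => (0:Int))))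
        (↑(A.length - 1)) (↑(pvC A - 1)) (pvS A (A.length - 1) (pvC A - 1))) r c
      = pvD1 A (A.length - 1) r c := by
    intro r c hr hc2
    rw [pvGN_set2 _ (A.length - 1) (pvC A - 1) _ r c (by rw [hlen0]; omega)
      (by rw [hget0 _ (by omega)]; omega)]
    by_cases hcase : r = A.length - 1 ∧ c = pvC A - 1
    · obtain ⟨rfl, rfl⟩ := hcase
      rw [if_pos ⟨rfl, rfl⟩]
      unfold pvD1
      rw [if_pos ⟨rfl, le_refl _⟩]
    · rw [if_neg hcase, hinv0 r c hr hc2]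
      unfold pvD1
      split_ifs <;> first | rfl | omega
  obtain ⟨dp1, e1, sh1, inv1⟩ := pvLoop1 A hrect hC (A.length - 1) (by omega) _
    (max (pvGN A 0 0) (pvS A (A.length - 1) (pvC A - 1))) hshI hinvI
  rw [e1]
  obtain ⟨dp2, e2, sh2, inv2⟩ := pvLoop2 A hrect hR (pvC A - 1) (by omega) dp1
    (pvM1 A (A.length - 1) (max (pvGN A 0 0) (pvS A (A.length - 1) (pvC A - 1)))) sh1
    (by
      intro r c hr hc2
      rw [inv1 r c hr hc2]
      unfold pvD1 pvD2
      split_ifs <;> first | rfl | omega)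
  rw [e2]
  obtain ⟨dp3, e3, sh3, inv3⟩ := pvLoop3 A hrect hC (A.length - 1) (by omega) dp2
    (pvM2 A (pvC A - 1)
      (pvM1 A (A.length - 1) (max (pvGN A 0 0) (pvS A (A.length - 1) (pvC A - 1))))) sh2
    (by
      intro r c hr hc2
      rw [inv2 r c hr hc2]
      unfold pvD2 pvD3
      split_ifs <;> first | rfl | omega)
  rw [e3]
  -- B's loop
  rw [show A.reverse = (A.take A.length).reverse from by rw [List.take_length]]
  obtain ⟨below', eB⟩ := pvAltLoop A hrect A.length (le_refl _) (List.replicate (pvC A) 0) none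
    (by simp)
    (by
      intro j hj
      have hrep : (List.replicate (pvC A) (0:Int)).getD j 0 = 0 := by
        simp [List.getD_eq_getElem?_getD, hj]
      rw [hrep, pvS_len])
  rw [eB]
  have hsome := pvOuterN_some A hC A.length none (Or.inl hR)
  obtain ⟨bfin, hb⟩ := Option.isSome_iff_exists.mp hsome
  rw [hb]
  -- both sides are the max of the same cell values
  set m0 : Int := max (pvGN A 0 0) (pvS A (A.length - 1) (pvC A - 1)) with hm0
  set Am : Int := pvM3 A (A.length - 1) (pvM2 A (pvC A - 1) (pvM1 A (A.length - 1) m0)) with hAm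
  have hchain : pvM1 A (A.length - 1) m0 ≤ Am :=
    le_trans (pvM2_mono A (pvC A - 1) _) (pvM3_mono A (A.length - 1) _)
  have hchain2 : pvM2 A (pvC A - 1) (pvM1 A (A.length - 1) m0) ≤ Am :=
    pvM3_mono A (A.length - 1) _
  have hubA : ∀ r c, r < A.length → c < pvC A → pvS A r c ≤ Am ∧ pvGN A r c ≤ Am := by
    intro r c hr hc2
    by_cases h1 : c = pvC A - 1
    · subst h1
      by_cases h2 : r = A.length - 1
      · subst h2
        have h3 : pvS A (A.length - 1) (pvC A - 1) ≤ m0 := le_max_right _ _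
        have h4 : m0 ≤ Am := le_trans (pvM1_mono A (A.length - 1) m0) hchain
        refine ⟨le_trans h3 h4, ?_⟩
        rw [← pvS_corner A hrect hC hR]
        exact le_trans h3 h4
      · have h3 := pvM1_ge A (A.length - 1) m0 r (by omega)
        exact ⟨le_trans h3.1 hchain, le_trans h3.2 hchain⟩
    · by_cases h2 : r = A.length - 1
      · subst h2
        have h3 := pvM2_ge A (pvC A - 1) (pvM1 A (A.length - 1) m0) c (by omega)
        exact ⟨le_trans h3.1 hchain2, le_trans h3.2 hchain2⟩
      · exact pvM3_ge A (A.length - 1) _ r c (by omega) (by omega)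
  have hubB : ∀ r c, r < A.length → c < pvC A → pvCell A r c ≤ bfin :=
    fun r c hr hc2 => pvOuterN_ge_cell A A.length r c hr hc2 none bfin hb
  have hBle : bfin ≤ Am :=
    pvOuterN_lub A A.length none Am (fun x hx => by cases hx)
      (fun r hr j hj => max_le (hubA r j hr hj).1 (hubA r j hr hj).2) bfin hb
  have hAle : Am ≤ bfin := by
    refine pvM3_lub A (A.length - 1) _ bfin ?_ ?_
    · refine pvM2_lub A (pvC A - 1) _ bfin ?_ ?_
      · refine pvM1_lub A (A.length - 1) _ bfin ?_ ?_
        · refine max_le ?_ ?_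
          · exact le_trans (le_max_right _ _) (hubB 0 0 (by omega) (by omega))
          · exact le_trans (le_max_left _ _)
              (hubB (A.length - 1) (pvC A - 1) (by omega) (by omega))
        · intro i hi
          have := hubB i (pvC A - 1) (by omega) (by omega)
          exact ⟨le_trans (le_max_left _ _) this, le_trans (le_max_right _ _) this⟩
      · intro j hj
        have := hubB (A.length - 1) j (by omega) (by omega)
        exact ⟨le_trans (le_max_left _ _) this, le_trans (le_max_right _ _) this⟩
    · intro i hi j hj
      have := hubB i j (by omega) (by omega)
      exact ⟨le_trans (le_max_left _ _) this, le_trans (le_max_right _ _) this⟩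
  exact le_antisymm hAle hBle

theorem solve_spec : Claim_equal_solve := by
  intro A _ hpre
  obtain ⟨hA, hH, hrect⟩ := hpre
  unfold Spec_solve
  exact pvFinal A hA hH (fun row hrow => by rw [pvC_eq_headD]; exact hrect row hrow)
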